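-- pv_equiv track=rewrite | github.com/turnstilelabs/arxitex | arxitex/tools/retrieval/retrieval_benchmark.py | _first_rel_rank
-- ===== SOURCE A (Python) =====
-- from typing import Dict, Iterable, List, Tuple
--
-- def _first_rel_rank(retrieved: List[str], rel_set: Iterable[str]) -> int | None:
--     rel = set(rel_set)
--     if not rel:
--         return None
--     for i, doc_id in enumerate(retrieved):
--         if doc_id in rel:
--             return i + 1
--     return None
-- ===== SOURCE B (Python) =====
-- def _first_rel_rank(retrieved, rel_set):
--     pos = {}
--     for i, d in enumerate(retrieved):
--         if d not in pos:
--             pos[d] = i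
--     best = None
--     for r in rel_set:
--         i = pos.get(r)
--         if i is not None and (best is None or i < best):
--             best = i
--     return None if best is None else best + 1
-- ===== Notes on version B (the rewrite author's own statement) =====
-- stated objective: alternative
-- what changed: A scans retrieved with an early exit on set membership; B builds a first-occurrence index dict over retrieved once and then takes the minimum indexed position over the relevant ids, with no early exit and no set construction.
import Mathlib
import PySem

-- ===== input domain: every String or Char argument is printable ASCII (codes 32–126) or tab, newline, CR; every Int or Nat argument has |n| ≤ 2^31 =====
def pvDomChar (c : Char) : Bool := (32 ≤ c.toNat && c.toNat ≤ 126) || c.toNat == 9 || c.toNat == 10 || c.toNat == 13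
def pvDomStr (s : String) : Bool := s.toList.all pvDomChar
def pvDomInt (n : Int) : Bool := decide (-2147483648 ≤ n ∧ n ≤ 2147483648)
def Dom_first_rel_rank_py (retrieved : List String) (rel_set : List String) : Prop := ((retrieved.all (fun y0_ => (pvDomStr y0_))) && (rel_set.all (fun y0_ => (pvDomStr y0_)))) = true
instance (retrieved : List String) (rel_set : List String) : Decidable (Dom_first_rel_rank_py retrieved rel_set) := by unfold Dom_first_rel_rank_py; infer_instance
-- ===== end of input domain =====

-- B builds a first-occurrence index dict once and minimises over the relevant ids, instead of A's early-exit membership scan; alternative decomposition, return value only.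

-- ===== PORT A =====
-- for i, doc_id in enumerate(retrieved): if doc_id in rel: return i + 1
def frrA_loop (rel : PySem.Set String) : List (Int × String) → Option Int
  | [] => none
  | (i, d) :: rest => if PySem.Set.contains rel d then some (i + 1) else frrA_loop rel rest

def first_rel_rank_py (retrieved : List String) (rel_set : List String) : Option Int :=
  let rel := PySem.Set.ofList rel_set
  if rel.isEmpty then none
  else frrA_loop rel (PySem.List.enumerate retrieved 0)

-- ===== PORT B =====
-- for i, d in enumerate(retrieved): if d not in pos: pos[d] = i
def frrB_pos : List (Int × String) → PySem.Dict String Int → PySem.Dict String Int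
  | [], pos => pos
  | (i, d) :: rest, pos =>
      frrB_pos rest (if PySem.Dict.contains pos d then pos else pos.insert d i)

-- for r in rel_set: i = pos.get(r); if i is not None and (best is None or i < best): best = i
def frrB_best (pos : PySem.Dict String Int) : List String → Option Int → Option Int
  | [], best => best
  | r :: rest, best =>
      frrB_best pos rest
        (match pos.get? r with
         | some i =>
             match best with
             | none => some i
             | some b => if i < b then some i else some b
         | none => best)

def first_rel_rank_py_alt (retrieved : List String) (rel_set : List String) : Option Int :=
  let pos := frrB_pos (PySem.List.enumerate retrieved 0) PySem.Dict.empty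
  match frrB_best pos rel_set none with
  | none => none
  | some b => some (b + 1)

-- ===== PRECONDITION & SPEC =====
def Spec_first_rel_rank_py (retrieved : List String) (rel_set : List String) (out : Option Int) : Prop := out = first_rel_rank_py_alt retrieved rel_set
instance (retrieved : List String) (rel_set : List String) (out : Option Int) : Decidable (Spec_first_rel_rank_py retrieved rel_set out) := by unfold Spec_first_rel_rank_py; infer_instance

-- ===== CLAIM (what is proved, stated in full; the proofs are below) =====
def Claim_equal_first_rel_rank_py : Prop := ∀ (retrieved : List String) (rel_set : List String), Dom_first_rel_rank_py retrieved rel_set → Spec_first_rel_rank_py retrieved rel_set (first_rel_rank_py retrieved rel_set)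

-- ===== LEMMAS AND PROOFS =====

-- first index i with element in rels, over an enumerated list
def frrFirstIdx (rels : List String) : List (Int × String) → Option Int
  | [] => none
  | (i, d) :: rest => if d ∈ rels then some i else frrFirstIdx rels rest

-- first occurrence index of r, over an enumerated list
def frrFstOcc (r : String) : List (Int × String) → Option Int
  | [] => none
  | (i, d) :: rest => if d = r then some i else frrFstOcc r rest

theorem frrA_loop_eq (rel_set : List String) (es : List (Int × String)) :
    frrA_loop (PySem.Set.ofList rel_set) es = (frrFirstIdx rel_set es).map (· + 1) := by
  induction es with
  | nil => rfl
  | cons p rest ih =>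
      obtain ⟨i, d⟩ := p
      simp only [frrA_loop, frrFirstIdx]
      by_cases h : d ∈ rel_set
      · simp [h]
      · have hc : PySem.Set.contains (PySem.Set.ofList rel_set) d = false := by
          rw [Bool.eq_false_iff]
          intro hcon
          exact h ((PySem.Set.mem_ofList _ _).1 ((PySem.Set.contains_iff _ _).1 hcon))
        simp [ih, h]

theorem frrFirstIdx_nil_rels (es : List (Int × String)) : frrFirstIdx [] es = none := by
  induction es with
  | nil => rfl
  | cons p rest ih => obtain ⟨i, d⟩ := p; simp [frrFirstIdx, ih]

-- the pos dict looks up the first occurrence (earlier entries of pos0 win)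
theorem frrB_pos_get? (es : List (Int × String)) (pos0 : PySem.Dict String Int) (r : String) :
    (frrB_pos es pos0).get? r = (pos0.get? r).or (frrFstOcc r es) := by
  induction es generalizing pos0 with
  | nil => simp [frrB_pos, frrFstOcc]
  | cons p rest ih =>
      obtain ⟨i, d⟩ := p
      simp only [frrB_pos, frrFstOcc]
      by_cases hc : PySem.Dict.contains pos0 d
      · have hs : (pos0.get? d).isSome := by rw [← PySem.Dict.contains_eq_isSome_get?, hc]
        rw [if_pos hc, ih]
        by_cases hdr : d = r
        · subst hdr
          obtain ⟨v, hv⟩ := Option.isSome_iff_exists.1 hs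
          simp [hv]
        · simp [hdr]
      · have hn : pos0.get? d = none := by
          cases h : pos0.get? d with
          | none => rfl
          | some v =>
              exfalso; apply hc
              rw [PySem.Dict.contains_eq_isSome_get?, h]; rfl
        rw [if_neg hc, ih]
        by_cases hdr : d = r
        · subst hdr; simp [PySem.Dict.get?_insert_self, hn]
        · rw [PySem.Dict.get?_insert_of_ne _ _ (fun h => hdr h.symm)]
          simp [hdr]

-- every index recorded in an enumeration from s is ≥ s
theorem frrFstOcc_ge (r : String) (xs : List String) (s v : Int)
    (h : frrFstOcc r (PySem.List.enumerate xs s) = some v) : s ≤ v := by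
  induction xs generalizing s with
  | nil => simp [PySem.List.enumerate, frrFstOcc] at h
  | cons x t ih =>
      rw [PySem.List.enumerate_cons] at h
      simp only [frrFstOcc] at h
      by_cases hx : x = r
      · rw [if_pos hx] at h; have := Option.some.inj h; omega
      · rw [if_neg hx] at h; have := ih (s + 1) h; omega

-- frrB_best is the running minimum over the found positions
theorem frrB_best_eq_foldl (pos : PySem.Dict String Int) (rels : List String) (b : Option Int) :
    frrB_best pos rels b =
      (rels.filterMap pos.get?).foldl
        (fun acc i => match acc with | none => some i | some m => some (min m i)) b := by
  induction rels generalizing b with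
  | nil => rfl
  | cons r rest ih =>
      simp only [frrB_best, List.filterMap_cons]
      cases hg : pos.get? r with
      | none => rw [ih]
      | some i =>
          rw [List.foldl_cons, ih]
          congr 1
          cases b with
          | none => rfl
          | some m =>
              simp only []
              by_cases h : i < m
              · rw [if_pos h]; congr 1; omega
              · rw [if_neg h]; congr 1; omega

theorem frr_foldl_min_some (l : List Int) (b : Int) :
    l.foldl (fun acc i => match acc with | none => some i | some m => some (min m i)) (some b)
      = some (l.foldl min b) := by
  induction l generalizing b with
  | nil => rfl
  | cons x t ih => simp [ih]

theorem frrB_best_eq_min? (pos : PySem.Dict String Int) (rels : List String) :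
    frrB_best pos rels none = PySem.List.min? (rels.filterMap pos.get?) (fun y => y) := by
  rw [frrB_best_eq_foldl]
  cases h : rels.filterMap pos.get? with
  | nil => rfl
  | cons x t =>
      rw [PySem.List.min?_id_cons, List.foldl_cons, frr_foldl_min_some]

-- the minimum over first-occurrence positions of the relevant ids IS the first matching index
theorem frrFirstIdx_eq_min? (xs : List String) (rels : List String) (s : Int) :
    frrFirstIdx rels (PySem.List.enumerate xs s)
      = PySem.List.min? (rels.filterMap (fun r => frrFstOcc r (PySem.List.enumerate xs s))) (fun y => y) := by
  induction xs generalizing s with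
  | nil =>
      simp [PySem.List.enumerate, frrFstOcc]
      rfl
  | cons x t ih =>
      rw [PySem.List.enumerate_cons]
      simp only [frrFirstIdx]
      by_cases hx : x ∈ rels
      · rw [if_pos hx]
        -- every candidate is ≥ s and s is a candidate, so the minimum is s
        set L := rels.filterMap (fun r => frrFstOcc r ((s, x) :: PySem.List.enumerate t (s + 1))) with hL
        have hmemL : s ∈ L := by
          rw [hL]
          exact List.mem_filterMap.2 ⟨x, hx, by simp [frrFstOcc]⟩
        have hge : ∀ y ∈ L, s ≤ y := by
          intro y hy
          obtain ⟨r, _, hr⟩ := List.mem_filterMap.1 (hL ▸ hy)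
          simp only [frrFstOcc] at hr
          by_cases hxr : x = r
          · rw [if_pos hxr] at hr; have := Option.some.inj hr; omega
          · rw [if_neg hxr] at hr
            have := frrFstOcc_ge r t (s + 1) y hr; omega
        cases hm : PySem.List.min? L (fun y => y) with
        | none =>
            exact absurd ((PySem.List.min?_eq_none_iff _ _).1 hm ▸ hmemL) (List.not_mem_nil)
        | some m =>
            have h1 : m ≤ s := PySem.List.min?_isMin hm s hmemL
            have h2 : s ≤ m := hge m (PySem.List.min?_mem hm)
            have : m = s := le_antisymm h1 h2
            rw [this]
      · rw [if_neg hx, ih (s + 1)]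
        congr 1
        apply List.filterMap_congr
        intro r hr
        simp only [frrFstOcc]
        rw [if_neg (fun h : x = r => hx (h ▸ hr))]

-- ===== VERDICT (by name: the statement is the Claim_ definition above) =====
theorem first_rel_rank_py_spec : Claim_equal_first_rel_rank_py := by
  intro retrieved rel_set _
  unfold Spec_first_rel_rank_py first_rel_rank_py first_rel_rank_py_alt
  simp only []
  rw [frrB_best_eq_min?]
  have hpos : ∀ r, (frrB_pos (PySem.List.enumerate retrieved 0) PySem.Dict.empty).get? r
      = frrFstOcc r (PySem.List.enumerate retrieved 0) := by
    intro r; rw [frrB_pos_get?]; simp [PySem.Dict.get?_empty]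
  rw [List.filterMap_congr (fun r _ => hpos r), ← frrFirstIdx_eq_min?]
  by_cases hempty : (PySem.Set.ofList rel_set).isEmpty
  · have h0 : PySem.Set.ofList rel_set = [] := List.isEmpty_iff.1 hempty
    have hnil : rel_set = [] := by
      cases rel_set with
      | nil => rfl
      | cons a t =>
          exact absurd ((PySem.Set.mem_ofList (a :: t) a).2 (by simp)) (by rw [h0]; simp)
    subst hnil
    simp [frrFirstIdx_nil_rels]
  · rw [if_neg hempty, frrA_loop_eq]
    cases frrFirstIdx rel_set (PySem.List.enumerate retrieved 0) <;> rfl
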